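-- pv_equiv track=rewrite | github.com/KawikaN/Chat-Gidens | app.py | is_manual_event_query
-- ===== SOURCE A (Python) =====
-- def is_manual_event_query(query: str) -> bool:
--     """Check if a query is asking to create a manual event."""
--     query_lower = query.lower()
--
--     # Keywords that indicate manual event creation
--     create_keywords = [
--         "create event", "add event", "make event", "schedule event",
--         "create appointment", "add appointment", "schedule appointment",
--         "add to calendar", "put in calendar", "create calendar event",
--         "schedule meeting", "book appointment", "set reminder",
--         "add an event", "create an event", "make an event",
--         "schedule an event", "book an event", "plan an event"
--     ]
--
--     # Check for exact matches first (highest priority)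
--     if any(keyword in query_lower for keyword in create_keywords):
--         return True
--
--     # Check for patterns with creation verbs followed by event-related words
--     creation_verbs = ["create", "add", "make", "schedule", "book", "plan", "set"]
--     event_words = ["event", "appointment", "meeting", "reminder", "calendar"]
--
--     # Split query into words
--     words = query_lower.split()
--
--     # Look for creation verb + event word pattern
--     for i, word in enumerate(words):
--         if word in creation_verbs:
--             # Check if an event word appears within next few words
--             for j in range(i+1, min(i+4, len(words))):
--                 if words[j] in event_words:
--                     return True
--
--     # Check for patterns like "schedule X on Y" or "add X to my calendar"
--     # where X could be any event name
--     if any(verb in query_lower for verb in creation_verbs):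
--         if any(phrase in query_lower for phrase in ["on", "for", "at", "calendar", "tomorrow", "today", "next"]):
--             return True
--
--     return False
-- ===== SOURCE B (Python) =====
-- def is_manual_event_query(query: str) -> bool:
--     """Check if a query is asking to create a manual event."""
--     q = query.lower()
--
--     create_keywords = [
--         "create event", "add event", "make event", "schedule event",
--         "create appointment", "add appointment", "schedule appointment",
--         "add to calendar", "put in calendar", "create calendar event",
--         "schedule meeting", "book appointment", "set reminder",
--         "add an event", "create an event", "make an event",
--         "schedule an event", "book an event", "plan an event",
--     ]
--     creation_verbs = ["create", "add", "make", "schedule", "book", "plan", "set"]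
--     event_words = ["event", "appointment", "meeting", "reminder", "calendar"]
--     context_phrases = ["on", "for", "at", "calendar", "tomorrow", "today", "next"]
--
--     # Phase 2 as one forward pass: `window` counts how many more word positions
--     # an event word may still pair with the most recently seen creation verb.
--     window = 0
--     pair_found = False
--     for w in q.split():
--         if window > 0 and w in event_words:
--             pair_found = True
--             break
--         window = 3 if w in creation_verbs else max(window - 1, 0)
--
--     return (
--         any(k in q for k in create_keywords)
--         or pair_found
--         or (any(v in q for v in creation_verbs)
--             and any(p in q for p in context_phrases))
--     )
-- ===== Notes on version B (the rewrite author's own statement) =====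
-- stated objective: alternative
-- what changed: The verb-then-lookahead nested scan of phase 2 is replaced by a single left-to-right pass over the words that maintains a countdown window since the last creation verb, returning a match when an event word arrives while the window is open; phases 1 and 3 stay substring checks combined as a pure OR.
import Mathlib
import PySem

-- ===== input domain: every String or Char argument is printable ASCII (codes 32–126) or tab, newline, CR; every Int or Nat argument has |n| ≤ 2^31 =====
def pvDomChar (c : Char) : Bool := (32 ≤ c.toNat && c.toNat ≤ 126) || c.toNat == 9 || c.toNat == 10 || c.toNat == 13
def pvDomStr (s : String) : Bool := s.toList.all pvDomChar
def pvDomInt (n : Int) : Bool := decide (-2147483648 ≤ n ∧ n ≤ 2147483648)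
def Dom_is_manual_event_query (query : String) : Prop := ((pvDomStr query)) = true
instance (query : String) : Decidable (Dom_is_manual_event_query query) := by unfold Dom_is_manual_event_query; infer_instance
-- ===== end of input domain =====

-- B keeps the substring phases and replaces the nested verb→lookahead scan by one
-- forward pass with a countdown window (objective: alternative; same asymptotics).

-- ===== PORT A =====
-- shared data (keyword lists from the Python source)
def createKeywords : List String :=
  ["create event", "add event", "make event", "schedule event",
   "create appointment", "add appointment", "schedule appointment",
   "add to calendar", "put in calendar", "create calendar event",
   "schedule meeting", "book appointment", "set reminder",
   "add an event", "create an event", "make an event",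
   "schedule an event", "book an event", "plan an event"]

def creationVerbs : List String :=
  ["create", "add", "make", "schedule", "book", "plan", "set"]

def eventWords : List String :=
  ["event", "appointment", "meeting", "reminder", "calendar"]

def contextPhrases : List String :=
  ["on", "for", "at", "calendar", "tomorrow", "today", "next"]

def is_manual_event_query (query : String) : Bool :=
  let ql := PySem.Str.lower query
  if createKeywords.any (fun kw => PySem.Str.isIn kw ql) then true
  else
    let words := PySem.Str.split₀ ql
    if (PySem.List.enumerate words 0).any (fun iw =>
         creationVerbs.contains iw.2 &&
         (PySem.List.pyRange (iw.1 + 1) (min (iw.1 + 4) (words.length : Int)) 1).any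
           (fun j => eventWords.contains (PySem.List.pyGetD words j "")))
    then true
    else if creationVerbs.any (fun v => PySem.Str.isIn v ql) then
      if contextPhrases.any (fun p => PySem.Str.isIn p ql) then true
      else false
    else false

-- ===== PORT B =====
-- one forward pass; `window` = remaining positions on which an event word may pair
def scanVerbEvent : Nat → List String → Bool
  | _, [] => false
  | window, w :: ws =>
    if window > 0 && eventWords.contains w then true
    else scanVerbEvent (if creationVerbs.contains w then 3 else window - 1) ws

def is_manual_event_query_alt (query : String) : Bool :=
  let q := PySem.Str.lower query
  createKeywords.any (fun kw => PySem.Str.isIn kw q)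
  || scanVerbEvent 0 (PySem.Str.split₀ q)
  || (creationVerbs.any (fun v => PySem.Str.isIn v q)
      && contextPhrases.any (fun p => PySem.Str.isIn p q))

-- ===== PRECONDITION & SPEC =====
def Spec_is_manual_event_query (query : String) (out : Bool) : Prop := out = is_manual_event_query_alt query
instance (query : String) (out : Bool) : Decidable (Spec_is_manual_event_query query out) := by unfold Spec_is_manual_event_query; infer_instance

-- ===== CLAIM (what is proved, stated in full; the proofs are below) =====
def Claim_equal_is_manual_event_query : Prop := ∀ (query : String), Dom_is_manual_event_query query → Spec_is_manual_event_query query (is_manual_event_query query)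

-- ===== LEMMAS AND PROOFS =====

-- A's phase-2 nested scan, characterised: a verb at i and an event word at j with i < j ≤ i+3.
lemma phase2A_iff (words : List String) :
    (PySem.List.enumerate words 0).any (fun iw =>
        creationVerbs.contains iw.2 &&
        (PySem.List.pyRange (iw.1 + 1) (min (iw.1 + 4) (words.length : Int)) 1).any
          (fun j => eventWords.contains (PySem.List.pyGetD words j ""))) = true
    ↔ ∃ i j : Nat, ∃ wi wj : String, words[i]? = some wi ∧ words[j]? = some wj ∧
        i < j ∧ j ≤ i + 3 ∧ creationVerbs.contains wi ∧ eventWords.contains wj := by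
  rw [List.any_eq_true]
  constructor
  · rintro ⟨iw, hmem, hiw⟩
    obtain ⟨hv, hinner⟩ := Bool.and_eq_true_iff.mp hiw
    obtain ⟨k, hk⟩ := List.mem_iff_getElem?.mp hmem
    rw [PySem.List.getElem?_enumerate] at hk
    obtain ⟨wi, hwi, hpair⟩ := Option.map_eq_some_iff.mp hk
    rw [List.any_eq_true] at hinner
    obtain ⟨j, hjmem, hfj⟩ := hinner
    rw [PySem.List.mem_pyRange_one] at hjmem
    subst hpair
    simp only [] at hfj hjmem
    have hk' : k < words.length := (List.getElem?_eq_some_iff.mp hwi).1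
    have hj0 : (0:Int) ≤ j := by omega
    have hjlen : j < (words.length : Int) := by omega
    rw [PySem.List.pyGetD_eq_getElem words "" hj0 hjlen] at hfj
    refine ⟨k, j.toNat, wi, words[j.toNat], hwi, List.getElem?_eq_getElem (by omega), ?_, ?_, hv, hfj⟩
    · omega
    · omega
  · rintro ⟨i, j, wi, wj, hi, hj, hij, hij3, hv, he⟩
    have hiw : i < words.length := (List.getElem?_eq_some_iff.mp hi).1
    have hjw : j < words.length := (List.getElem?_eq_some_iff.mp hj).1
    refine ⟨((i : Int), wi), ?_, ?_⟩
    · rw [List.mem_iff_getElem?]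
      exact ⟨i, by rw [PySem.List.getElem?_enumerate, hi]; simp⟩
    · rw [Bool.and_eq_true_iff]
      refine ⟨hv, ?_⟩
      rw [List.any_eq_true]
      refine ⟨(j : Int), ?_, ?_⟩
      · rw [PySem.List.mem_pyRange_one]
        refine ⟨by omega, by omega⟩
      · rw [PySem.List.pyGetD_eq_getElem words "" (by omega) (by exact_mod_cast hjw)]
        simp only [Int.toNat_natCast]
        have hwjv : words[j] = wj := by
          have h' := hj
          rwa [List.getElem?_eq_getElem hjw, Option.some.injEq] at h'
        rw [hwjv]; exact he

-- B's scan, characterised (window ≤ 3 is the loop invariant).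
lemma scanVerbEvent_iff (c : Nat) (hc : c ≤ 3) (ws : List String) :
    scanVerbEvent c ws = true
    ↔ ∃ j : Nat, ∃ wj : String, ws[j]? = some wj ∧ eventWords.contains wj ∧
        (j < c ∨ ∃ i : Nat, ∃ wi : String, ws[i]? = some wi ∧
          creationVerbs.contains wi ∧ i < j ∧ j ≤ i + 3) := by
  induction ws generalizing c with
  | nil => simp [scanVerbEvent]
  | cons w ws ih =>
    rw [scanVerbEvent]
    by_cases hw : (decide (0 < c) && eventWords.contains w) = true
    · rw [if_pos hw]
      obtain ⟨hc0, hew⟩ := Bool.and_eq_true_iff.mp hw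
      exact ⟨fun _ => ⟨0, w, rfl, hew, Or.inl (by simpa using hc0)⟩, fun _ => rfl⟩
    · rw [if_neg hw]
      rw [ih (c := if creationVerbs.contains w then 3 else c - 1) (by split <;> omega)]
      constructor
      · rintro ⟨j, wj, hj, hev, h | ⟨i, wi, hi, hv, hij, hij3⟩⟩
        · by_cases hvw : creationVerbs.contains w = true
          · rw [if_pos hvw] at h
            exact ⟨j + 1, wj, by simpa using hj, hev,
              Or.inr ⟨0, w, rfl, hvw, by omega, by omega⟩⟩
          · rw [if_neg hvw] at h
            exact ⟨j + 1, wj, by simpa using hj, hev, Or.inl (by omega)⟩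
        · exact ⟨j + 1, wj, by simpa using hj, hev,
            Or.inr ⟨i + 1, wi, by simpa using hi, hv, by omega, by omega⟩⟩
      · rintro ⟨j, wj, hj, hev, hcase⟩
        match j, hj with
        | 0, hj =>
          simp only [List.getElem?_cons_zero, Option.some.injEq] at hj
          subst hj
          rcases hcase with h | ⟨i, wi, hi, hv, hij, hij3⟩
          · simp [h] at hw; exact absurd (by simpa using hev) hw
          · omega
        | j + 1, hj =>
          simp only [List.getElem?_cons_succ] at hj
          refine ⟨j, wj, hj, hev, ?_⟩
          rcases hcase with h | ⟨i, wi, hi, hv, hij, hij3⟩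
          · left
            by_cases hvw : creationVerbs.contains w = true
            · rw [if_pos hvw]; omega
            · rw [if_neg hvw]; omega
          · match i, hi with
            | 0, hi =>
              simp only [List.getElem?_cons_zero, Option.some.injEq] at hi
              subst hi
              left; rw [if_pos hv]; omega
            | i + 1, hi =>
              simp only [List.getElem?_cons_succ] at hi
              exact Or.inr ⟨i, wi, hi, hv, by omega, by omega⟩

lemma phase2_eq (words : List String) :
    (PySem.List.enumerate words 0).any (fun iw =>
        creationVerbs.contains iw.2 &&
        (PySem.List.pyRange (iw.1 + 1) (min (iw.1 + 4) (words.length : Int)) 1).any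
          (fun j => eventWords.contains (PySem.List.pyGetD words j "")))
      = scanVerbEvent 0 words := by
  rw [Bool.eq_iff_iff, phase2A_iff, scanVerbEvent_iff 0 (by omega)]
  constructor
  · rintro ⟨i, j, wi, wj, hi, hj, hij, hij3, hv, he⟩
    exact ⟨j, wj, hj, he, Or.inr ⟨i, wi, hi, hv, hij, hij3⟩⟩
  · rintro ⟨j, wj, hj, he, h | ⟨i, wi, hi, hv, hij, hij3⟩⟩
    · omega
    · exact ⟨i, j, wi, wj, hi, hj, hij, hij3, hv, he⟩

-- the if-return-True chain of A is the disjunction B writes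
lemma ifchain_eq_or (a b c d : Bool) :
    (if a then true else if b then true else if c then (if d then true else false) else false)
      = (a || b || (c && d)) := by
  cases a <;> cases b <;> cases c <;> cases d <;> rfl

-- ===== VERDICT (by name: the statement is the Claim_ definition above) =====
theorem is_manual_event_query_spec : Claim_equal_is_manual_event_query := by
  intro query _
  unfold Spec_is_manual_event_query is_manual_event_query is_manual_event_query_alt
  simp only [phase2_eq]
  exact ifchain_eq_or _ _ _ _
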